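-- pv_equiv track=rewrite | github.com/jeremysmission/HybridRAG3 | src/core/hallucination_guard/nli_verifier.py | _prune_chunks
-- ===== SOURCE A (Python) =====
-- def _prune_chunks(claim_text, chunks, keep=3):
--     """
--     Pick the N most relevant chunks for this specific claim.
--
--     HOW IT WORKS:
--         Counts how many words from the claim appear in each chunk.
--         Returns the top N chunks by overlap count. This is dirt-cheap
--         (pure string ops, <1ms) and dramatically reduces NLI calls.
--
--     WHY THIS HELPS:
--         A typical query returns 5-8 chunks. Most claims relate to
--         only 1-2 of those chunks. Checking all 8 means 6 wasted
--         NLI forward passes per claim. With pruning, we check ~3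
--         instead of ~8, cutting total inference by 60%.
--
--     PARAMETERS:
--         claim_text: str      -- The claim to match against
--         chunks:     list     -- All available source chunks
--         keep:       int      -- How many to keep (default 3)
--
--     RETURNS:
--         list -- The top N chunks sorted by keyword relevance
--     """
--     if len(chunks) <= keep:
--         return chunks
--
--     # Extract claim words (lowercase, 3+ chars, no stopwords)
--     stopwords = {
--         "the", "and", "for", "are", "was", "were", "has", "have",
--         "had", "been", "this", "that", "with", "from", "not", "but",
--         "they", "its", "all", "can", "will", "use", "used", "using",
--     }
--     claim_words = set()
--     for w in claim_text.lower().split():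
--         cleaned = "".join(c for c in w if c.isalnum())
--         if len(cleaned) >= 3 and cleaned not in stopwords:
--             claim_words.add(cleaned)
--
--     if not claim_words:
--         return chunks[:keep]
--
--     # Score each chunk by word overlap
--     scored = []
--     for i, chunk in enumerate(chunks):
--         chunk_lower = chunk.lower()
--         overlap = sum(1 for w in claim_words if w in chunk_lower)
--         scored.append((overlap, i, chunk))
--
--     # Sort by overlap (highest first), keep top N
--     scored.sort(key=lambda x: x[0], reverse=True)
--     return [s[2] for s in scored[:keep]]
-- ===== SOURCE B (Python) =====
-- def _prune_chunks(claim_text, chunks, keep=3):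
--     if len(chunks) <= keep:
--         return chunks
--
--     stopwords = {
--         "the", "and", "for", "are", "was", "were", "has", "have",
--         "had", "been", "this", "that", "with", "from", "not", "but",
--         "they", "its", "all", "can", "will", "use", "used", "using",
--     }
--     claim_words = set()
--     for w in claim_text.lower().split():
--         cleaned = "".join(c for c in w if c.isalnum())
--         if len(cleaned) >= 3 and cleaned not in stopwords:
--             claim_words.add(cleaned)
--
--     if not claim_words:
--         return chunks[:keep]
--
--     # Counting-sort style: bucket chunks by overlap count (original order kept
--     # inside each bucket), then walk the buckets from highest possible overlap
--     # down to 0 -- no comparison sort needed.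
--     buckets = {}
--     for chunk in chunks:
--         chunk_lower = chunk.lower()
--         overlap = sum(1 for w in claim_words if w in chunk_lower)
--         buckets.setdefault(overlap, []).append(chunk)
--
--     result = []
--     for ov in range(len(claim_words), -1, -1):
--         if ov in buckets:
--             result.extend(buckets[ov])
--     return result[:keep]
-- ===== Notes on version B (the rewrite author's own statement) =====
-- stated objective: alternative
-- what changed: Replaces the build-score-tuples-then-stable-reverse-sort step with a counting-sort traversal: chunks are bucketed by overlap count in one pass and the result is produced by walking the buckets from the maximum possible overlap (len(claim_words)) down to 0, then cut to keep.
import Mathlib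
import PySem

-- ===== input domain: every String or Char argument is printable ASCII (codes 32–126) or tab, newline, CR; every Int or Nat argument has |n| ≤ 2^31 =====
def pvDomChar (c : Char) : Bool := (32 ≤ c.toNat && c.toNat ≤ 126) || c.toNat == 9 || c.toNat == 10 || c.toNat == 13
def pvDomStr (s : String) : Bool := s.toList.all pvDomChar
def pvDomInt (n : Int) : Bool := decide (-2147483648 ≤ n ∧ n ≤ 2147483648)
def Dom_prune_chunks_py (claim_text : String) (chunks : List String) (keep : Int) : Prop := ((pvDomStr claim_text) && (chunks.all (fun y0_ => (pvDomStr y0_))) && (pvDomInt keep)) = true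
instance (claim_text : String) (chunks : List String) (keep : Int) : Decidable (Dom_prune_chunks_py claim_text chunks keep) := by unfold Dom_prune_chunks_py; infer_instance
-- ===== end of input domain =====

-- B replaces A's build-scored-list-and-stable-reverse-sort by a counting-sort traversal over
-- overlap buckets (objective: alternative algorithm, same results).

-- Shared preamble helpers (identical Python code in A and B: stopword set, claim-word
-- extraction, per-chunk overlap score).
def pcStopwords : List (List Char) :=
  ["the", "and", "for", "are", "was", "were", "has", "have",
   "had", "been", "this", "that", "with", "from", "not", "but",
   "they", "its", "all", "can", "will", "use", "used", "using"].map String.toList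

def pcClaimWords (claim_text : String) : PySem.Set (List Char) :=
  (PySem.Chars.split₀ (PySem.Chars.lower claim_text.toList)).foldl
    (fun s w =>
      let cleaned := w.filter PySem.Chars.isalnum
      if 3 ≤ cleaned.length ∧ cleaned ∉ pcStopwords then PySem.Set.add s cleaned else s)
    PySem.Set.empty

-- sum(1 for w in claim_words if w in chunk_lower) with chunk_lower = chunk.lower()
def pcOverlap (claim_words : List (List Char)) (chunk : String) : Int :=
  (claim_words.map (fun w => if PySem.Chars.isIn w (PySem.Chars.lower chunk.toList) then (1 : Int) else 0)).sum

-- ===== PORT A =====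
def prune_chunks_py (claim_text : String) (chunks : List String) (keep : Int) : List String :=
  if PySem.List.len chunks ≤ keep then chunks
  else
    let claim_words := pcClaimWords claim_text
    if claim_words = [] then PySem.List.slice chunks none (some keep)
    else
      -- scored = [(overlap, i, chunk) for i, chunk in enumerate(chunks)] built by append
      let scored := chunks.zipIdx.foldl
        (fun acc p => acc ++ [(pcOverlap claim_words p.1, ((p.2 : Nat) : Int), p.1)]) []
      -- scored.sort(key=lambda x: x[0], reverse=True); [s[2] for s in scored[:keep]]
      let sortedScored := PySem.List.sorted scored (fun x => x.1) true
      (PySem.List.slice sortedScored none (some keep)).map (fun s => s.2.2)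

-- ===== PORT B =====
def prune_chunks_py_alt (claim_text : String) (chunks : List String) (keep : Int) : List String :=
  if PySem.List.len chunks ≤ keep then chunks
  else
    let claim_words := pcClaimWords claim_text
    if claim_words = [] then PySem.List.slice chunks none (some keep)
    else
      -- buckets.setdefault(overlap, []).append(chunk)
      let buckets := chunks.foldl
        (fun d chunk => d.modify (pcOverlap claim_words chunk) [] (fun l => l ++ [chunk]))
        (PySem.Dict.empty : PySem.Dict Int (List String))
      -- for ov in range(len(claim_words), -1, -1): if ov in buckets: result.extend(buckets[ov])
      let result := (PySem.List.pyRange (PySem.List.len claim_words) (-1) (-1)).foldl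
        (fun acc ov => if buckets.contains ov then acc ++ buckets.getD ov [] else acc) []
      PySem.List.slice result none (some keep)

-- ===== PRECONDITION & SPEC =====
def Spec_prune_chunks_py (claim_text : String) (chunks : List String) (keep : Int) (out : List String) : Prop := out = prune_chunks_py_alt claim_text chunks keep
instance (claim_text : String) (chunks : List String) (keep : Int) (out : List String) : Decidable (Spec_prune_chunks_py claim_text chunks keep out) := by unfold Spec_prune_chunks_py; infer_instance

-- ===== CLAIM (what is proved, stated in full; the proofs are below) =====
def Claim_equal_prune_chunks_py : Prop := ∀ (claim_text : String) (chunks : List String) (keep : Int), Dom_prune_chunks_py claim_text chunks keep → Spec_prune_chunks_py claim_text chunks keep (prune_chunks_py claim_text chunks keep)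

-- ===== LEMMAS AND PROOFS =====

-- flatMap congruence on members
theorem pc_flatMap_congr {α β : Type} (l : List α) (f g : α → List β)
    (h : ∀ x ∈ l, f x = g x) : l.flatMap f = l.flatMap g := by
  simp only [List.flatMap_def]
  rw [List.map_congr_left h]

-- insertBy walks past a prefix it does not go before
theorem pc_insertBy_append {α : Type} (before : α → α → Bool) (x : α) (as bs : List α)
    (h : ∀ y ∈ as, before x y = false) :
    PySem.List.insertBy before x (as ++ bs) = as ++ PySem.List.insertBy before x bs := by
  induction as with
  | nil => simp
  | cons a as ih =>
    simp only [List.cons_append, PySem.List.insertBy, h a (by simp)]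
    simpa using ih (fun y hy => h y (by simp [hy]))

-- insertBy goes to the front when it goes before everything
theorem pc_insertBy_cons {α : Type} (before : α → α → Bool) (x : α) (bs : List α)
    (h : ∀ y ∈ bs, before x y = true) :
    PySem.List.insertBy before x bs = x :: bs := by
  cases bs with
  | nil => rfl
  | cons b bs => simp [PySem.List.insertBy, h b (by simp)]

-- inserting into a concatenation of key-homogeneous buckets listed in strictly
-- descending key order appends the element to the end of its bucket
theorem pc_insertBy_buckets {α : Type} (key : α → Int) (x : α) (vals : List Int)
    (g : Int → List α)
    (hdesc : vals.Pairwise (fun a b => b < a))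
    (hg : ∀ v ∈ vals, ∀ y ∈ g v, key y = v)
    (hx : key x ∈ vals) :
    PySem.List.insertBy (fun a b => decide (key b < key a)) x (vals.flatMap g)
      = vals.flatMap (fun v => g v ++ if key x == v then [x] else []) := by
  induction vals with
  | nil => simp at hx
  | cons v vs ih =>
    have hvlt : ∀ w ∈ vs, w < v := by
      intro w hw; exact (List.pairwise_cons.mp hdesc).1 w hw
    by_cases hkv : key x = v
    · -- x lands at the end of bucket v
      have h1 : ∀ y ∈ g v, (fun a b => decide (key b < key a)) x y = false := by
        intro y hy; simp [hg v (by simp) y hy, hkv]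
      have h2 : ∀ y ∈ vs.flatMap g, (fun a b => decide (key b < key a)) x y = true := by
        intro y hy
        rcases List.mem_flatMap.mp hy with ⟨w, hw, hyw⟩
        simp [hg w (by simp [hw]) y hyw, hkv, hvlt w hw]
      rw [List.flatMap_cons, pc_insertBy_append _ _ _ _ h1, pc_insertBy_cons _ _ _ h2]
      have hnone : ∀ w ∈ vs, (if key x == w then [x] else []) = ([] : List α) := by
        intro w hw
        have hlt := hvlt w hw
        simp only [beq_iff_eq]
        rw [if_neg (by omega)]
      have hcongr : vs.flatMap (fun w => g w ++ if key x == w then [x] else []) = vs.flatMap g :=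
        pc_flatMap_congr vs _ _ (fun w hw => by rw [hnone w hw, List.append_nil])
      simp only [List.flatMap_cons]
      rw [hcongr]
      simp [hkv]
    · have hxvs : key x ∈ vs := by
        rcases List.mem_cons.mp hx with h | h
        · exact absurd h hkv
        · exact h
      have hxlt : key x < v := hvlt _ hxvs
      have h1 : ∀ y ∈ g v, (fun a b => decide (key b < key a)) x y = false := by
        intro y hy; simp [hg v (by simp) y hy]; omega
      rw [List.flatMap_cons, pc_insertBy_append _ _ _ _ h1,
        ih (List.pairwise_cons.mp hdesc).2 (fun w hw y hy => hg w (by simp [hw]) y hy) hxvs]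
      simp only [List.flatMap_cons, beq_iff_eq]
      rw [if_neg hkv]
      simp

-- stability of Python's reverse sort: it equals the concatenation of the original-order
-- buckets listed in strictly descending key order
theorem pc_sorted_rev_eq_buckets {α : Type} (xs : List α) (key : α → Int) (vals : List Int)
    (hdesc : vals.Pairwise (fun a b => b < a))
    (hcov : ∀ x ∈ xs, key x ∈ vals) :
    PySem.List.sorted xs key true = vals.flatMap (fun v => xs.filter (fun y => key y == v)) := by
  induction xs using List.reverseRecOn with
  | nil => simp [PySem.List.sorted_rev_eq_foldl_insertBy]
  | append_singleton xs x ih =>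
    rw [PySem.List.sorted_rev_eq_foldl_insertBy, List.foldl_append,
      ← PySem.List.sorted_rev_eq_foldl_insertBy]
    simp only [List.foldl_cons, List.foldl_nil]
    rw [ih (fun y hy => hcov y (by simp [hy]))]
    rw [pc_insertBy_buckets key x vals _ hdesc
      (fun v _ y hy => by simpa using (List.mem_filter.mp hy).2)
      (hcov x (by simp))]
    apply pc_flatMap_congr
    intro v hv
    simp [List.filter_append, List.filter_cons]

-- slicing commutes with map
theorem pc_map_slice {α β : Type} (f : α → β) (xs : List α) (a? b? : Option Int) :
    (PySem.List.slice xs a? b?).map f = PySem.List.slice (xs.map f) a? b? := by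
  simp [PySem.List.slice, List.map_take, List.map_drop]

-- projecting the chunk out of a key-filtered enumeration filters the chunks
theorem pc_zipIdx_filter (chunks : List String) (p : String → Bool) (n : Nat) :
    ((chunks.zipIdx n).filter (fun q => p q.1)).map (fun q => q.1) = chunks.filter p := by
  induction chunks generalizing n with
  | nil => rfl
  | cons c cs ih =>
    by_cases hc : p c = true <;> simp [List.zipIdx_cons, hc, ih]

-- the else-branch equality: stable reverse sort of scored triples, projected and cut,
-- equals the descending bucket walk, cut
theorem pc_main (CW : List (List Char)) (chunks : List String) (keep : Int) :
    (PySem.List.slice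
        (PySem.List.sorted
          (chunks.zipIdx.foldl
            (fun acc p => acc ++ [(pcOverlap CW p.1, ((p.2 : Nat) : Int), p.1)]) [])
          (fun x => x.1) true)
        none (some keep)).map (fun s => s.2.2)
      = PySem.List.slice
          ((PySem.List.pyRange (PySem.List.len CW) (-1) (-1)).foldl
            (fun acc ov =>
              if (chunks.foldl
                    (fun d chunk => d.modify (pcOverlap CW chunk) [] (fun l => l ++ [chunk]))
                    (PySem.Dict.empty : PySem.Dict Int (List String))).contains ov
              then acc ++ (chunks.foldl
                    (fun d chunk => d.modify (pcOverlap CW chunk) [] (fun l => l ++ [chunk]))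
                    (PySem.Dict.empty : PySem.Dict Int (List String))).getD ov []
              else acc) [])
          none (some keep) := by
  have hscored : chunks.zipIdx.foldl
      (fun acc p => acc ++ [(pcOverlap CW p.1, ((p.2 : Nat) : Int), p.1)]) []
      = chunks.zipIdx.map (fun p => (pcOverlap CW p.1, ((p.2 : Nat) : Int), p.1)) := by
    simpa using PySem.List.foldl_append_singleton_eq_map
      (fun p : String × Nat => (pcOverlap CW p.1, ((p.2 : Nat) : Int), p.1)) chunks.zipIdx []
  have hdesc : (PySem.List.pyRange (PySem.List.len CW) (-1) (-1)).Pairwise (fun a b => b < a) := by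
    rw [PySem.List.pyRange_neg_one, PySem.List.len_eq]
    exact (List.pairwise_lt_range).map _ (fun a b h => by omega)
  have hscore_bound : ∀ c : String, ∃ n : Nat, n ≤ CW.length ∧ pcOverlap CW c = (n : Int) := by
    intro c
    refine ⟨CW.countP (fun w => PySem.Chars.isIn w (PySem.Chars.lower c.toList)),
      List.countP_le_length, ?_⟩
    simpa [pcOverlap] using PySem.List.sum_map_ite_one_zero
      (fun w => PySem.Chars.isIn w (PySem.Chars.lower c.toList)) CW
  have hscore_mem : ∀ c : String, pcOverlap CW c ∈ PySem.List.pyRange (PySem.List.len CW) (-1) (-1) := by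
    intro c
    obtain ⟨n, hn, hval⟩ := hscore_bound c
    rw [PySem.List.pyRange_neg_one, PySem.List.len_eq, hval]
    exact List.mem_map.mpr ⟨CW.length - n, List.mem_range.mpr (by omega), by omega⟩
  have hcov : ∀ t ∈ chunks.zipIdx.map (fun p => (pcOverlap CW p.1, ((p.2 : Nat) : Int), p.1)),
      (fun (x : Int × Int × String) => x.1) t ∈ PySem.List.pyRange (PySem.List.len CW) (-1) (-1) := by
    intro t ht
    rcases List.mem_map.mp ht with ⟨q, hq, rfl⟩
    exact hscore_mem q.1
  rw [hscored, pc_sorted_rev_eq_buckets (α := Int × Int × String) _ (fun x => x.1)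
      (PySem.List.pyRange (PySem.List.len CW) (-1) (-1)) hdesc hcov,
    pc_map_slice, List.map_flatMap]
  have hbucket : ∀ ov : Int,
      (chunks.foldl
        (fun d chunk => d.modify (pcOverlap CW chunk) [] (fun l => l ++ [chunk]))
        (PySem.Dict.empty : PySem.Dict Int (List String))).getD ov []
      = chunks.filter (fun c => pcOverlap CW c == ov) := by
    intro ov
    rw [← List.foldl_map (f := fun c => (pcOverlap CW c, c))
        (g := fun (d : PySem.Dict Int (List String)) (p : Int × String) =>
          d.modify p.1 [] (fun l => l ++ [p.2])),
      PySem.Dict.getD_foldl_modify_append, List.filter_map, List.map_map]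
    simp [Function.comp_def]
  have hfold : ((PySem.List.pyRange (PySem.List.len CW) (-1) (-1)).foldl
      (fun acc ov =>
        if (chunks.foldl
              (fun d chunk => d.modify (pcOverlap CW chunk) [] (fun l => l ++ [chunk]))
              (PySem.Dict.empty : PySem.Dict Int (List String))).contains ov
        then acc ++ (chunks.foldl
              (fun d chunk => d.modify (pcOverlap CW chunk) [] (fun l => l ++ [chunk]))
              (PySem.Dict.empty : PySem.Dict Int (List String))).getD ov []
        else acc) [])
      = (PySem.List.pyRange (PySem.List.len CW) (-1) (-1)).flatMap
          (fun ov => chunks.filter (fun c => pcOverlap CW c == ov)) := by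
    rw [PySem.List.foldl_congr_mem _ _
        (fun acc ov => acc ++ chunks.filter (fun c => pcOverlap CW c == ov)) []
        (by intro acc ov hov
            by_cases hc : (chunks.foldl
                (fun d chunk => d.modify (pcOverlap CW chunk) [] (fun l => l ++ [chunk]))
                (PySem.Dict.empty : PySem.Dict Int (List String))).contains ov = true
            · rw [if_pos hc, hbucket]
            · rw [if_neg hc]
              have hz := hbucket ov
              rw [PySem.Dict.getD_of_not_contains _ _ (by simpa using hc)] at hz
              simp [← hz])]
    simpa using PySem.List.foldl_append_eq_flatMap
      (fun ov => chunks.filter (fun c => pcOverlap CW c == ov))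
      (PySem.List.pyRange (PySem.List.len CW) (-1) (-1)) []
  rw [hfold]
  congr 1
  apply pc_flatMap_congr
  intro v hv
  rw [List.filter_map, List.map_map]
  exact pc_zipIdx_filter chunks (fun c => pcOverlap CW c == v) 0

-- ===== VERDICT (by name: the statement is the Claim_ definition above) =====
theorem prune_chunks_py_spec : Claim_equal_prune_chunks_py := by
  intro claim_text chunks keep _
  unfold Spec_prune_chunks_py prune_chunks_py prune_chunks_py_alt
  by_cases h1 : PySem.List.len chunks ≤ keep
  · rw [if_pos h1, if_pos h1]
  · rw [if_neg h1, if_neg h1]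
    by_cases h2 : pcClaimWords claim_text = []
    · rw [if_pos h2, if_pos h2]
    · rw [if_neg h2, if_neg h2]
      exact pc_main (pcClaimWords claim_text) chunks keep
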